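-- pv_equiv track=rewrite | github.com/geswanel/Algorithms | YaAlgoTrainings/Training5.0/LinSearch/I.py | minMovesToCol
-- ===== SOURCE A (Python) =====
-- def minMovesToCol(N, colCnt):
--     prefix = [0] * N
--     suffix = [0] * N
--     movesToCol = 0
--     for col in range(N):
--         prefix[col] = colCnt[col] + (prefix[col - 1] if col > 0 else 0)
--         suffix[-1 - col] = colCnt[-1 - col] + (suffix[-1 - col + 1] if col > 0 else 0)
--         movesToCol += (col - 0) * colCnt[col]
--
--     minMoves = movesToCol
--     col = 0
--     while col + 1 < N:
--         movesToCol += prefix[col] - suffix[col + 1]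
--         col += 1
--         if movesToCol < minMoves:
--             minMoves = movesToCol
--
--     return minMoves
-- ===== SOURCE B (Python) =====
-- def minMovesToCol(N, colCnt):
--     return min(
--         (sum(colCnt[j] * abs(i - j) for j in range(N)) for i in range(N)),
--         default=0,
--     )
-- ===== Notes on version B (the rewrite author's own statement) =====
-- stated objective: simpler
-- what changed: Replaced A's prefix/suffix arrays and incremental running-cost sweep by a direct nested-loop minimum: for each candidate column i take min of sum(colCnt[j]*abs(i-j)), no auxiliary arrays and no incremental updates.
-- outside the precondition, e.g. on minMovesToCol(2, [1, 2, 3]): A returns 0, B returns 1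
import Mathlib
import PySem

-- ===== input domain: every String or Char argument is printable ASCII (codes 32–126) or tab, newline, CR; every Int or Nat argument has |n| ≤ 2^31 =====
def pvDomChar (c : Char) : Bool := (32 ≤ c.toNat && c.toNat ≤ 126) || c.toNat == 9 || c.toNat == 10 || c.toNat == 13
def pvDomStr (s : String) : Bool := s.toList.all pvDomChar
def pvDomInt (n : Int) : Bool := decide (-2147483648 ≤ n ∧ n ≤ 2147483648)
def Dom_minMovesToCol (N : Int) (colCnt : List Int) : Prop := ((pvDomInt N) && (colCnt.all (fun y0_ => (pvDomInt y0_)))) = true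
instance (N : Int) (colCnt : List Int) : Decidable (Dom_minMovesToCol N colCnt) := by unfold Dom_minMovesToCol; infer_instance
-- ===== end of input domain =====

-- B replaces A's prefix/suffix incremental sweep with a plain nested-loop minimum of
-- sum(colCnt[j]*abs(i-j)); objective: simpler (no auxiliary arrays, no incremental updates).

-- ===== PORT A =====
-- body of A's first for-loop (state = (prefix, suffix, movesToCol))
def stepA (colCnt : List Int) (st : List Int × List Int × Int) (col : Int) : List Int × List Int × Int :=
  let pre := st.1
  let suf := st.2.1
  let mv := st.2.2
  let pre' := PySem.List.pySetD pre col
    (PySem.List.pyGetD colCnt col 0 + (if col > 0 then PySem.List.pyGetD pre (col - 1) 0 else 0))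
  let suf' := PySem.List.pySetD suf (-1 - col)
    (PySem.List.pyGetD colCnt (-1 - col) 0 + (if col > 0 then PySem.List.pyGetD suf (-1 - col + 1) 0 else 0))
  (pre', suf', mv + (col - 0) * PySem.List.pyGetD colCnt col 0)

-- A's while loop; fuel bounds the number of remaining iterations
def whileA (pre suf : List Int) (N : Int) : Nat → Int → Int → Int → Int
  | 0, _, _, minM => minM
  | fuel + 1, col, moves, minM =>
    if col + 1 < N then
      let moves' := moves + PySem.List.pyGetD pre col 0 - PySem.List.pyGetD suf (col + 1) 0
      whileA pre suf N fuel (col + 1) moves' (if moves' < minM then moves' else minM)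
    else minM

def minMovesToCol (N : Int) (colCnt : List Int) : Int :=
  let st := (PySem.List.pyRange 0 N 1).foldl (stepA colCnt)
    (PySem.List.pyRepeat [0] N, PySem.List.pyRepeat [0] N, 0)
  whileA st.1 st.2.1 N N.toNat 0 st.2.2 st.2.2

-- ===== PORT B =====
def minMovesToCol_alt (N : Int) (colCnt : List Int) : Int :=
  let costs := (PySem.List.pyRange 0 N 1).map (fun i =>
    ((PySem.List.pyRange 0 N 1).map (fun j =>
      PySem.List.pyGetD colCnt j 0 * (((i - j).natAbs : Int)))).sum)
  match PySem.List.min? costs (fun x => x) with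
  | some m => m
  | none => 0

-- ===== PRECONDITION & SPEC =====
-- Pre_ requires len(colCnt) == N (or N ≤ 0, where A returns 0 with no candidate column):
-- when the list is longer than N, A's negative indexing builds the suffix array from the
-- list's tail while the prefix uses its head, an accidental mix of unrelated entries;
-- when the list is shorter than a positive N, A raises IndexError.
def Pre_minMovesToCol (N : Int) (colCnt : List Int) : Prop :=
  N ≤ 0 ∨ (colCnt.length : Int) = N
instance (N : Int) (colCnt : List Int) : Decidable (Pre_minMovesToCol N colCnt) := by
  unfold Pre_minMovesToCol; infer_instance
def pvWitness_minMovesToCol : Int × List Int := (3, [2, 0, 5])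

def Spec_minMovesToCol (N : Int) (colCnt : List Int) (out : Int) : Prop := out = minMovesToCol_alt N colCnt
instance (N : Int) (colCnt : List Int) (out : Int) : Decidable (Spec_minMovesToCol N colCnt out) := by unfold Spec_minMovesToCol; infer_instance

-- ===== CLAIM (what is proved, stated in full; the proofs are below) =====
def Claim_equal_minMovesToCol : Prop := ∀ (N : Int) (colCnt : List Int), Dom_minMovesToCol N colCnt → Pre_minMovesToCol N colCnt → Spec_minMovesToCol N colCnt (minMovesToCol N colCnt)

-- ===== LEMMAS AND PROOFS =====

theorem pyGetD_neg' (xs : List Int) (k : Nat) (d : Int) (h : k < xs.length) :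
    PySem.List.pyGetD xs (-1 - (k : Int)) d = xs.getD (xs.length - 1 - k) d := by
  have h1 : (-1 - (k : Int)) = -((k + 1 : Nat) : Int) := by push_cast; ring
  rw [h1, PySem.List.pyGetD_neg_natCast xs (k+1) d (by omega) (by omega),
      List.getD_eq_getElem _ _ (by omega)]
  congr 1; omega

theorem pySetD_neg' (xs : List Int) (k : Nat) (v : Int) (h : k < xs.length) :
    PySem.List.pySetD xs (-1 - (k : Int)) v = xs.set (xs.length - 1 - k) v := by
  simp only [PySem.List.pySetD, PySem.List.pySet?, PySem.List.pyIdx?]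
  split_ifs with h1 h2 h3 <;> try omega
  · simp only [Option.map_some, Option.getD_some]
    congr 1; omega

theorem take_sum_succ (c : List Int) (k : Nat) (h : k < c.length) :
    (c.take (k + 1)).sum = (c.take k).sum + c.getD k 0 := by
  rw [List.take_add_one, List.sum_append, List.getElem?_eq_getElem h,
      List.getD_eq_getElem _ _ h]
  simp

theorem drop_sum_eq (c : List Int) (k : Nat) (h : k < c.length) :
    (c.drop k).sum = c.getD k 0 + (c.drop (k + 1)).sum := by
  rw [List.drop_eq_getElem_cons h, List.sum_cons, List.getD_eq_getElem _ _ h]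

theorem sum_range_getD (c : List Int) (m : Nat) :
    ((List.range m).map (fun j => c.getD j 0)).sum = (c.take m).sum := by
  induction m with
  | zero => simp
  | succ m ih =>
    rw [List.range_succ, List.map_append, List.sum_append, ih]
    simp only [List.map_cons, List.map_nil, List.sum_cons, List.sum_nil, add_zero]
    by_cases h : m < c.length
    · rw [take_sum_succ c m h]
    · rw [List.getD_eq_default _ _ (by omega), List.take_of_length_le (by omega),
          List.take_of_length_le (by omega)]
      simp

def cost (c : List Int) (i : Int) : Int :=
  ((List.range c.length).map (fun j => c.getD j 0 * (((i - (j : Int)).natAbs : Int)))).sum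

theorem sum_map_neg_int (l : List Nat) (f : Nat → Int) :
    (l.map (fun x => -f x)).sum = -(l.map f).sum := by
  induction l with
  | nil => simp
  | cons a t ih => simp [ih]; ring

theorem getD_drop' (c : List Int) (s i : Nat) :
    (c.drop s).getD i 0 = c.getD (s + i) 0 := by
  simp [List.getD_eq_getElem?_getD, List.getElem?_drop]

theorem cost_succ (c : List Int) (k : Nat) (hk : k + 1 < c.length) :
    cost c ((k : Int) + 1) = cost c k + (c.take (k + 1)).sum - (c.drop (k + 1)).sum := by
  unfold cost
  have key : ∀ j ∈ List.range c.length,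
      c.getD j 0 * ((((k : Int) + 1) - (j : Int)).natAbs : Int)
      = (fun j => c.getD j 0 * (((k : Int) - (j : Int)).natAbs : Int)) j
        + (fun j => if j ≤ k then c.getD j 0 else -c.getD j 0) j := by
    intro j _
    by_cases h : j ≤ k
    · have hx : ((((k : Int) + 1) - (j : Int)).natAbs : Int)
          = (((k : Int) - (j : Int)).natAbs : Int) + 1 := by omega
      simp only [h, if_true, hx]; ring
    · have hx : (((k : Int) - (j : Int)).natAbs : Int)
          = ((((k : Int) + 1) - (j : Int)).natAbs : Int) + 1 := by omega
      simp only [h, if_false, hx]; ring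
  rw [List.map_congr_left key, PySem.List.sum_map_add_int]
  have hsplit : ((List.range c.length).map
      (fun j => if j ≤ k then c.getD j 0 else -c.getD j 0)).sum
      = (c.take (k + 1)).sum - (c.drop (k + 1)).sum := by
    have hn : c.length = (k + 1) + (c.length - (k + 1)) := by omega
    rw [hn, List.range_add, List.map_append, List.sum_append]
    have h1 : ((List.range (k + 1)).map
        (fun j => if j ≤ k then c.getD j 0 else -c.getD j 0)).sum
        = (c.take (k + 1)).sum := by
      rw [List.map_congr_left (g := fun j => c.getD j 0)
          (by intro j hj; simp only [List.mem_range] at hj; simp [Nat.lt_succ_iff.mp hj])]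
      exact sum_range_getD c (k + 1)
    have h2 : (((List.range (c.length - (k + 1))).map (fun x => k + 1 + x)).map
        (fun j => if j ≤ k then c.getD j 0 else -c.getD j 0)).sum
        = -(c.drop (k + 1)).sum := by
      rw [List.map_map]
      have : ((fun j => if j ≤ k then c.getD j 0 else -c.getD j 0) ∘ fun x => k + 1 + x)
          = fun x => -((c.drop (k + 1)).getD x 0) := by
        funext x
        simp only [Function.comp]
        rw [if_neg (by omega), getD_drop']
      rw [this, sum_map_neg_int, sum_range_getD,
          List.take_of_length_le (by simp)]
    rw [h1, h2]; ring
  rw [hsplit]; ring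

theorem cost_zero (c : List Int) :
    cost c 0 = ((List.range c.length).map (fun (j : Nat) => (j : Int) * c.getD j 0)).sum := by
  unfold cost
  have key : ∀ j ∈ List.range c.length,
      c.getD j 0 * (((0 : Int) - (j : Int)).natAbs : Int)
      = (fun j : Nat => (j : Int) * c.getD j 0) j := by
    intro j _
    have : (((0 : Int) - (j : Int)).natAbs : Int) = (j : Int) := by omega
    simp only [this]; ring
  rw [List.map_congr_left key]

theorem getD_set_self (xs : List Int) (i : Nat) (v : Int) (h : i < xs.length) :
    (xs.set i v).getD i 0 = v := by
  simp [List.getD, h]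

theorem getD_set_ne (xs : List Int) (i j : Nat) (v : Int) (h : j ≠ i) :
    (xs.set i v).getD j 0 = xs.getD j 0 := by
  simp [List.getD, List.getElem?_set_ne (Ne.symm h)]

theorem invA (c : List Int) (k : Nat) (hk : k ≤ c.length) :
    (((PySem.List.pyRange 0 (k : Int) 1).foldl (stepA c)
      (List.replicate c.length 0, List.replicate c.length 0, 0)).1.length = c.length) ∧
    (((PySem.List.pyRange 0 (k : Int) 1).foldl (stepA c)
      (List.replicate c.length 0, List.replicate c.length 0, 0)).2.1.length = c.length) ∧
    (∀ j : Nat, j < k → ((PySem.List.pyRange 0 (k : Int) 1).foldl (stepA c)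
      (List.replicate c.length 0, List.replicate c.length 0, 0)).1.getD j 0 = (c.take (j + 1)).sum) ∧
    (∀ j : Nat, c.length - k ≤ j → j < c.length → ((PySem.List.pyRange 0 (k : Int) 1).foldl (stepA c)
      (List.replicate c.length 0, List.replicate c.length 0, 0)).2.1.getD j 0 = (c.drop j).sum) ∧
    (((PySem.List.pyRange 0 (k : Int) 1).foldl (stepA c)
      (List.replicate c.length 0, List.replicate c.length 0, 0)).2.2
      = ((List.range k).map (fun (j : Nat) => (j : Int) * c.getD j 0)).sum) := by
  induction k with
  | zero =>
    rw [show ((0 : Nat) : Int) = 0 by norm_num, PySem.List.pyRange_one_eq_nil le_rfl]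
    refine ⟨by simp, by simp, by omega, fun j h1 h2 => by omega, by simp⟩
  | succ k ih =>
    obtain ⟨L1, L2, P1, P2, P3⟩ := ih (by omega)
    rw [show ((k + 1 : Nat) : Int) = (k : Int) + 1 by push_cast; ring,
        PySem.List.pyRange_one_succ_right (by positivity), List.foldl_append]
    simp only [List.foldl_cons, List.foldl_nil]
    set st := (PySem.List.pyRange 0 (k : Int) 1).foldl (stepA c)
      (List.replicate c.length 0, List.replicate c.length 0, 0) with hst
    -- compute the step at col = k
    have hkl : k < c.length := by omega
    have hprev : (if (k : Int) > 0 then PySem.List.pyGetD st.1 ((k : Int) - 1) 0 else 0)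
        = (c.take k).sum := by
      by_cases h : 0 < k
      · rw [if_pos (by exact_mod_cast h),
            show (k : Int) - 1 = ((k - 1 : Nat) : Int) by push_cast [Nat.cast_sub h]; ring,
            PySem.List.pyGetD_natCast, P1 (k - 1) (by omega),
            show k - 1 + 1 = k by omega]
      · rw [if_neg (by omega), show k = 0 by omega]
        simp
    have hpre' : PySem.List.pySetD st.1 (k : Int)
        (PySem.List.pyGetD c (k : Int) 0 + (if (k : Int) > 0 then PySem.List.pyGetD st.1 ((k : Int) - 1) 0 else 0))
        = st.1.set k ((c.take (k + 1)).sum) := by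
      rw [hprev, PySem.List.pySetD_natCast, PySem.List.pyGetD_natCast,
          take_sum_succ c k hkl]
      ring_nf
    have hsufval : (if (k : Int) > 0 then PySem.List.pyGetD st.2.1 (-1 - (k : Int) + 1) 0 else 0)
        = (c.drop (c.length - k)).sum := by
      by_cases h : 0 < k
      · rw [if_pos (by exact_mod_cast h),
            show -1 - (k : Int) + 1 = -((k : Nat) : Int) by ring,
            PySem.List.pyGetD_neg_natCast st.2.1 k 0 h (by omega),
            List.getD_eq_getElem _ _ (by omega) |>.symm] at *
        · rw [show st.2.1.length - k = c.length - k by omega]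
          exact P2 (c.length - k) (by omega) (by omega)
      · rw [if_neg (by omega), show k = 0 by omega]
        rw [Nat.sub_zero, List.drop_length, List.sum_nil]
    have hsuf' : PySem.List.pySetD st.2.1 (-1 - (k : Int))
        (PySem.List.pyGetD c (-1 - (k : Int)) 0 + (if (k : Int) > 0 then PySem.List.pyGetD st.2.1 (-1 - (k : Int) + 1) 0 else 0))
        = st.2.1.set (c.length - 1 - k) ((c.drop (c.length - 1 - k)).sum) := by
      rw [hsufval, pyGetD_neg' c k 0 hkl, pySetD_neg' st.2.1 k _ (by omega), L2]
      congr 1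
      rw [drop_sum_eq c (c.length - 1 - k) (by omega),
          show c.length - 1 - k + 1 = c.length - k by omega]
    -- now the five conjuncts
    simp only [stepA, hpre', hsuf']
    refine ⟨by simpa using L1, by simpa using L2, ?_, ?_, ?_⟩
    · intro j hj
      by_cases h : j = k
      · subst h
        rw [getD_set_self _ _ _ (by omega)]
      · rw [getD_set_ne _ _ _ _ h, P1 j (by omega)]
    · intro j hj1 hj2
      by_cases h : j = c.length - 1 - k
      · subst h
        rw [getD_set_self _ _ _ (by omega)]
      · rw [getD_set_ne _ _ _ _ h, P2 j (by omega) hj2]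
    · rw [P3, List.range_succ, List.map_append, List.sum_append,
          PySem.List.pyGetD_natCast]
      simp

theorem whileA_spec (c pre suf : List Int) (n : Nat) (hn : n = c.length)
    (hp : ∀ j : Nat, j < n → PySem.List.pyGetD pre (j : Int) 0 = (c.take (j + 1)).sum)
    (hs : ∀ j : Nat, 0 < j → j < n → PySem.List.pyGetD suf (j : Int) 0 = (c.drop j).sum) :
    ∀ (fuel k : Nat) (minM : Int), k < n → n - 1 - k ≤ fuel →
      whileA pre suf (n : Int) fuel (k : Int) (cost c k) minM
        = ((List.range' (k + 1) (n - 1 - k)).map (fun (j : Nat) => cost c (j : Int))).foldl min minM := by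
  intro fuel
  induction fuel with
  | zero =>
    intro k minM hk hf
    rw [show n - 1 - k = 0 by omega]
    simp [whileA]
  | succ fuel ih =>
    intro k minM hk hf
    by_cases hlt : k + 1 < n
    · have hlt' : (k : Int) + 1 < (n : Int) := by exact_mod_cast hlt
      rw [whileA, if_pos hlt']
      have hmv : cost c k + PySem.List.pyGetD pre (k : Int) 0
          - PySem.List.pyGetD suf ((k : Int) + 1) 0 = cost c ((k : Int) + 1) := by
        rw [hp k hk, show (k : Int) + 1 = ((k + 1 : Nat) : Int) by push_cast; ring,
            hs (k + 1) (by omega) hlt]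
        push_cast
        rw [cost_succ c k (by omega)]
      simp only [hmv]
      have hmin : (if cost c ((k : Int) + 1) < minM then cost c ((k : Int) + 1) else minM)
          = min minM (cost c ((k : Int) + 1)) := by
        rw [min_def]; split_ifs <;> omega
      rw [hmin]
      have := ih (k + 1) (min minM (cost c ((k : Int) + 1))) hlt (by omega)
      rw [show ((k + 1 : Nat) : Int) = (k : Int) + 1 by push_cast; ring] at this
      rw [this, show n - 1 - k = (n - 1 - (k + 1)) + 1 by omega, List.range'_succ]
      simp only [List.map_cons, List.foldl_cons]
      norm_num
    · rw [show n - 1 - k = 0 by omega]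
      rw [whileA, if_neg (by exact_mod_cast hlt)]
      simp

theorem alt_eq (c : List Int) (n : Nat) (hn : n = c.length) (h0 : 0 < n) :
    minMovesToCol_alt (n : Int) c
      = ((List.range' 1 (n - 1)).map (fun (j : Nat) => cost c (j : Int))).foldl min (cost c 0) := by
  unfold minMovesToCol_alt
  have hr : PySem.List.pyRange 0 (n : Int) 1 = (List.range n).map (fun (k : Nat) => (k : Int)) := by
    rw [PySem.List.pyRange_one]
    simp
  have hcosts : (PySem.List.pyRange 0 (n : Int) 1).map (fun i =>
      ((PySem.List.pyRange 0 (n : Int) 1).map (fun j =>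
        PySem.List.pyGetD c j 0 * (((i - j).natAbs : Int)))).sum)
      = (List.range n).map (fun (k : Nat) => cost c (k : Int)) := by
    rw [hr, List.map_map]
    apply List.map_congr_left
    intro k _
    simp only [Function.comp]
    unfold cost
    rw [List.map_map, ← hn]
    apply congrArg
    apply List.map_congr_left
    intro j _
    simp only [Function.comp, PySem.List.pyGetD_natCast]
  simp only [hcosts]
  obtain ⟨m, rfl⟩ : ∃ m, n = m + 1 := ⟨n - 1, by omega⟩
  rw [List.range_succ_eq_map, List.map_cons, List.map_map,
      PySem.List.min?_id_cons]
  simp only [Nat.cast_zero, Nat.add_sub_cancel]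
  congr 1
  rw [List.range'_eq_map_range, List.map_map]
  apply List.map_congr_left
  intro k _
  simp only [Function.comp, Nat.succ_eq_add_one]
  congr 1
  push_cast
  ring

theorem final (N : Int) (c : List Int) (hPre : N ≤ 0 ∨ (c.length : Int) = N) :
    minMovesToCol N c = minMovesToCol_alt N c := by
  by_cases hN : N ≤ 0
  · unfold minMovesToCol minMovesToCol_alt
    rw [PySem.List.pyRange_one_eq_nil hN]
    simp only [List.foldl_nil, List.map_nil]
    rw [(PySem.List.min?_eq_none_iff _ _).mpr rfl,
        Int.toNat_of_nonpos hN]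
    rfl
  · have hn : (c.length : Int) = N := by tauto
    obtain rfl := hn.symm
    have h0 : 0 < c.length := by omega
    rw [alt_eq c c.length rfl h0]
    unfold minMovesToCol
    simp only [PySem.List.pyRepeat_singleton, Int.toNat_natCast]
    obtain ⟨L1, L2, P1, P2, P3⟩ := invA c c.length le_rfl
    set st := (PySem.List.pyRange 0 (c.length : Int) 1).foldl (stepA c)
      (List.replicate c.length 0, List.replicate c.length 0, 0) with hst
    have hmv : st.2.2 = cost c 0 := by
      rw [P3, ← cost_zero]
    have hp : ∀ j : Nat, j < c.length →
        PySem.List.pyGetD st.1 (j : Int) 0 = (c.take (j + 1)).sum := by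
      intro j hj
      rw [PySem.List.pyGetD_natCast]
      exact P1 j hj
    have hs : ∀ j : Nat, 0 < j → j < c.length →
        PySem.List.pyGetD st.2.1 (j : Int) 0 = (c.drop j).sum := by
      intro j _ hj
      rw [PySem.List.pyGetD_natCast]
      exact P2 j (by omega) hj
    have := whileA_spec c st.1 st.2.1 c.length rfl hp hs c.length 0 (cost c 0) h0 (by omega)
    simp only [Nat.cast_zero, Nat.sub_zero, Nat.zero_add] at this
    rw [hmv, this]

-- ===== VERDICT (by name: the statement is the Claim_ definition above) =====
theorem minMovesToCol_spec : Claim_equal_minMovesToCol := by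
  intro N colCnt _ hPre
  unfold Spec_minMovesToCol
  exact final N colCnt hPre
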